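-- pv_equiv track=rewrite | github.com/IUYsongyaya/swagger-client-test | test/tenant/id_settings.py | num_2_ascii
-- ===== SOURCE A (Python) =====
-- def num_2_ascii(num):
--     num_0 = 48
--     char_A = 65
--     max_val = 36 * 36 * 36 - 1
--     position = list()
--     assert num <= max_val, f"num:{num} must less than {max_val}"
--     while max_val:
--         position.append(num % 36)
--         num = num//36
--         max_val = max_val//36
--     return tuple("%c" % (val + num_0) if val < 10 else "%c" % (val - 10 + char_A) for val in reversed(position))
-- ===== SOURCE B (Python) =====
-- DIGITS = "0123456789ABCDEFGHIJKLMNOPQRSTUVWXYZ"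
--
--
-- def num_2_ascii(num):
--     max_val = 36 * 36 * 36 - 1
--     assert num <= max_val, f"num:{num} must less than {max_val}"
--     return tuple(DIGITS[(num // 36 ** i) % 36] for i in (2, 1, 0))
-- ===== Notes on version B (the rewrite author's own statement) =====
-- stated objective: simpler
-- what changed: Replaces the while-loop that peels least-significant digits into an accumulator list (driven by a throwaway max_val counter) and then reverses it, with a closed-form base-36 place-value extraction (floor-divide by the descending power, then take the remainder) looked up in a digit table, producing the most significant digit first.
import Mathlib
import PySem

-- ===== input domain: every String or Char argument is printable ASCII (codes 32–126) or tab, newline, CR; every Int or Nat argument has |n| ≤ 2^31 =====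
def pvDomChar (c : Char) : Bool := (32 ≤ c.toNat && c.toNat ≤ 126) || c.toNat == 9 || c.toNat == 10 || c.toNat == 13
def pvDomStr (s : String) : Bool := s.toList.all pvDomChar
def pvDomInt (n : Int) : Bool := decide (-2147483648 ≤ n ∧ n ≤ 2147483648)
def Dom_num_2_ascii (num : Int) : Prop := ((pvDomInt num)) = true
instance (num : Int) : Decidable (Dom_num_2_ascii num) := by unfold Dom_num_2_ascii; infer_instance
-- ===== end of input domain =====

-- B replaces A's peel-digits-then-reverse while-loop by a closed-form place-value
-- extraction (num // 36^i) % 36 over a digit table, most-significant digit first (objective: simpler).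

-- ===== PORT A =====
-- the while loop: condition 'max_val' (≠ 0); max_val only ever holds 46655, 1295, 35, 0,
-- so it is carried as a Nat and max_val // 36 is Nat division (exact for these nonnegative values)
def num2asciiLoop (num : Int) (maxVal : Nat) (position : List Int) : List Int :=
  if maxVal ≠ 0 then
    num2asciiLoop (PySem.Int.floordiv num 36) (maxVal / 36) (position ++ [PySem.Int.mod num 36])
  else position

-- '%c' % code  for the two branches of the generator expression
def num2asciiChar (val : Int) : String :=
  if val < 10 then String.ofList [Char.ofNat (val + 48).toNat]
  else String.ofList [Char.ofNat (val - 10 + 65).toNat]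

def num_2_ascii (num : Int) : List String :=
  (num2asciiLoop num (36 * 36 * 36 - 1) []).reverse.map num2asciiChar

-- ===== PORT B =====
def pvDigits : String := "0123456789ABCDEFGHIJKLMNOPQRSTUVWXYZ"

-- DIGITS[j]: the index (num // 36^i) % 36 is always in [0, 36), so pyGet? is always some;
-- the "" default is never used
def num_2_ascii_alt (num : Int) : List String :=
  ([2, 1, 0] : List Nat).map (fun i =>
    match PySem.Str.pyGet? pvDigits (PySem.Int.mod (PySem.Int.floordiv num (36 ^ i)) 36) with
    | some c => String.ofList [c]
    | none => "")

-- ===== PRECONDITION & SPEC =====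
-- A's assert: num ≤ 36^3 - 1; A raises AssertionError beyond it
def Pre_num_2_ascii (num : Int) : Prop := num ≤ 36 * 36 * 36 - 1
instance (num : Int) : Decidable (Pre_num_2_ascii num) := by unfold Pre_num_2_ascii; infer_instance
def pvWitness_num_2_ascii : Int := (12345)

def Spec_num_2_ascii (num : Int) (out : List String) : Prop := out = num_2_ascii_alt num
instance (num : Int) (out : List String) : Decidable (Spec_num_2_ascii num out) := by unfold Spec_num_2_ascii; infer_instance

-- ===== CLAIM (what is proved, stated in full; the proofs are below) =====
def Claim_equal_num_2_ascii : Prop := ∀ (num : Int), Dom_num_2_ascii num → Pre_num_2_ascii num → Spec_num_2_ascii num (num_2_ascii num)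

-- ===== LEMMAS AND PROOFS =====

-- A's three loop iterations, written out
theorem loop_unfold (num : Int) :
    num2asciiLoop num (36 * 36 * 36 - 1) [] =
      [PySem.Int.mod num 36,
       PySem.Int.mod (PySem.Int.floordiv num 36) 36,
       PySem.Int.mod (PySem.Int.floordiv (PySem.Int.floordiv num 36) 36) 36] := by
  rw [num2asciiLoop, num2asciiLoop, num2asciiLoop, num2asciiLoop]
  norm_num

-- two floor divisions by 36 are one floor division by 36²
theorem floordiv_floordiv_36 (num : Int) :
    PySem.Int.floordiv (PySem.Int.floordiv num 36) 36 = PySem.Int.floordiv num 1296 := by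
  rw [PySem.Int.floordiv_eq_ediv_of_pos (by norm_num),
      PySem.Int.floordiv_eq_ediv_of_pos (by norm_num),
      PySem.Int.floordiv_eq_ediv_of_pos (by norm_num),
      Int.ediv_ediv_of_nonneg (by norm_num)]
  norm_num

-- on any residue mod 36, A's '%c' formatting and B's digit-table lookup agree
-- (stated in the / and % the pysem lemmas normalise to)
theorem char_eq_digit (x : Int) :
    num2asciiChar (x % 36) =
      (match PySem.List.pyGet? pvDigits.toList (x % 36) with
       | some c => String.ofList [c]
       | none => "") := by
  have h0 : 0 ≤ x % 36 := Int.emod_nonneg x (by norm_num)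
  have h1 : x % 36 < 36 := Int.emod_lt_of_pos x (by norm_num)
  set v := x % 36 with hv
  clear_value v
  obtain ⟨n, rfl⟩ := Int.eq_ofNat_of_zero_le h0
  have hn : n < 36 := by exact_mod_cast h1
  interval_cases n <;> decide

-- ===== VERDICT (by name: the statement is the Claim_ definition above) =====
theorem num_2_ascii_spec : Claim_equal_num_2_ascii := by
  intro num _ _
  unfold Spec_num_2_ascii num_2_ascii num_2_ascii_alt
  rw [loop_unfold, floordiv_floordiv_36]
  simp only [List.reverse_cons, List.reverse_nil, List.nil_append, List.cons_append,
    List.map_cons, List.map_nil]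
  norm_num
  exact ⟨char_eq_digit (num / 1296), char_eq_digit (num / 36), char_eq_digit num⟩
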